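-- pv_equiv track=rewrite | github.com/juanignacioelosegui/td-i | tp/tp1/resuelto.py | n_esimo_cafetero
-- ===== SOURCE A (Python) =====
-- def filtrar_solo_CAFE(s:str) -> str:
--
--     '''
--     Requiere: nada
--     Devuelve: Una palabra compuestas solo por las letras "C", "A", "F", "E", pudiendo estar repetidas, desordenadas y no se requieren simultaneamente.
--     '''
--     s:str= s.upper()
--     palabra: str = ''
--     i:int = 0
--     #A
--     while i < len(s):
--         #B
--         if s[i] in 'CAFE':
--             palabra = palabra + s[i]
--         i = i + 1
--         #C
--     #D
--     return palabra
--
-- def es_cafetero (numero_escrito:int) -> bool: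
--     '''Requiere: numero_escrito > 0
--     Devuelve: True si el número hexadecimal de numero_escrito solo contiene los caracteres "C", "A", "F", "E" (sin repetir y en ese mismo orden). Caso contrario, devolverá como predeterminado False. '''
--
--     res:bool= False
--     n_hex:str= hex(numero_escrito).upper()
--
--     if ("B" in n_hex or "D" in n_hex):
--         res= False
--     elif (filtrar_solo_CAFE(str(n_hex)) == 'CAFE'):
--         res= True
--
--     return res
--
-- def n_esimo_cafetero(numero:int)->int:
--     '''Requiere:  numero  >0.
--     Devuelve; La posición del n-ésimo número cafetero cuyo numero cafetero es >= 51966 (el primer numero cafetero)'''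
--     N_esimo:int= 51966
--     num_cafes:int=1
--     #E
--     while num_cafes < numero:
--         #F
--         N_esimo=  N_esimo+1
--         if (es_cafetero(N_esimo)):
--             num_cafes= num_cafes +1
--         #G
--     #H
--     return  N_esimo
-- ===== SOURCE B (Python) =====
-- def n_esimo_cafetero(numero: int) -> int:
--     # Checks candidates numerically: a digit state machine over hex digits
--     # (least-significant first) replaces hex()/upper()/string filtering.
--     def es_cafetero_fsm(n: int) -> bool:
--         # hex digits read LSB-first must yield exactly E,F,A,C as the
--         # subsequence of letter digits (no other letter digits allowed).
--         state = 0
--         while n > 0: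
--             d = n % 16
--             n = n // 16
--             if d < 10:
--                 continue
--             elif state == 0 and d == 14:
--                 state = 1
--             elif state == 1 and d == 15:
--                 state = 2
--             elif state == 2 and d == 10:
--                 state = 3
--             elif state == 3 and d == 12:
--                 state = 4
--             else:
--                 return False
--         return state == 4
--
--     count = 0
--     m = 51966
--     while True:
--         if es_cafetero_fsm(m):
--             count += 1
--             if count >= numero:
--                 return m
--         m += 1
-- ===== Notes on version B (the rewrite author's own statement) =====
-- stated objective: faster
-- what changed: The per-candidate test no longer builds hex(n) and filters the string twice: B checks candidates numerically with a state machine over the hex digits obtained by repeated division (rejecting early at the first wrong letter digit), keeping the same incremental search for the wanted cafetero number.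
import Mathlib
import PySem

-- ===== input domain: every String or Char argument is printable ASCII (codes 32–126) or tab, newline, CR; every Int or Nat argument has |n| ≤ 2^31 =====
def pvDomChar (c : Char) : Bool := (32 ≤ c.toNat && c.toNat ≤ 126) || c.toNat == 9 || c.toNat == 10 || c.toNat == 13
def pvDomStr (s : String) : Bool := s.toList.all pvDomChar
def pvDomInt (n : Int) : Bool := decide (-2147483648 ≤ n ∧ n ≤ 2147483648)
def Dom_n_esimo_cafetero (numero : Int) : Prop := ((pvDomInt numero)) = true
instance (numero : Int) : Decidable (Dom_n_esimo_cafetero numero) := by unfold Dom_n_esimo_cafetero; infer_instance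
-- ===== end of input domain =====

-- B replaces A's per-candidate hex()/upper()/string-filter test by a numeric hex-digit
-- state machine with early exit (no string building); same value, measured constant-factor speedup.

-- ===== PORT A =====
-- hand port of hex(n)'s digit string (exact: lowercase hex digits, MSB first; empty for 0)
def hexDigitsChars (n : Nat) : List Char :=
  if h : n = 0 then [] else hexDigitsChars (n / 16) ++ [Nat.digitChar (n % 16)]
decreasing_by exact Nat.div_lt_self (Nat.pos_of_ne_zero h) (by norm_num)

-- hex(n) as a char list (exact: "0x…", "-0x…", "0x0")
def pyHexChars (n : Int) : List Char :=
  if n < 0 then ['-', '0', 'x'] ++ hexDigitsChars (-n).toNat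
  else if n = 0 then ['0', 'x', '0']
  else ['0', 'x'] ++ hexDigitsChars n.toNat

-- filtrar_solo_CAFE on char lists ('s[i] in "CAFE"' is the 1-char substring test)
def filtrarCAFE (s : List Char) : List Char :=
  (PySem.Chars.upper s).foldl
    (fun palabra c => if PySem.Chars.isIn [c] ['C', 'A', 'F', 'E'] then palabra ++ [c] else palabra) []

-- es_cafetero
def esCafetero (numeroEscrito : Int) : Bool :=
  let nhex := PySem.Chars.upper (pyHexChars numeroEscrito)
  if PySem.Chars.isIn ['B'] nhex || PySem.Chars.isIn ['D'] nhex then false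
  else if filtrarCAFE nhex = ['C', 'A', 'F', 'E'] then true
  else false

-- termination support for A's unbounded while-loop (cafetero numbers are unbounded);
-- cited by cafeLoopA's decreasing_by, hence placed above the port.
lemma upper_eq_map (s : List Char) : PySem.Chars.upper s = s.map PySem.Chars.upperChar := rfl

lemma filtrar_eq_filter (s : List Char) :
    filtrarCAFE s = (PySem.Chars.upper s).filter (fun c => PySem.Chars.isIn [c] ['C', 'A', 'F', 'E']) := by
  unfold filtrarCAFE
  rw [PySem.List.foldl_append_if_eq_filter]
  simp

lemma hexDigits_16mul (k : Nat) (hk : k ≠ 0) :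
    hexDigitsChars (16 * k) = hexDigitsChars k ++ ['0'] := by
  rw [hexDigitsChars.eq_def]
  rw [dif_neg (by positivity)]
  rw [Nat.mul_div_cancel_left _ (by norm_num), Nat.mul_mod_right]
  rfl

lemma isIn_singleton (c : Char) (l : List Char) : PySem.Chars.isIn [c] l = l.contains c := by
  rw [← Bool.coe_iff_coe, PySem.Chars.isIn_iff_infix, List.contains_iff_mem]
  constructor
  · exact fun h => h.sublist.subset (List.mem_singleton_self c)
  · intro hm
    obtain ⟨s, t, rfl⟩ := List.append_of_mem hm
    exact ⟨s, t, by simp⟩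

lemma esCaf_mul16 (m : Int) (hm : 0 < m) : esCafetero (16 * m) = esCafetero m := by
  have h1 : (16 * m).toNat = 16 * m.toNat := by omega
  have hpy : pyHexChars (16 * m) = pyHexChars m ++ ['0'] := by
    unfold pyHexChars
    rw [if_neg (by omega), if_neg (by omega), if_neg (by omega), if_neg (by omega)]
    rw [h1, hexDigits_16mul _ (by omega)]
    simp
  unfold esCafetero
  rw [hpy, upper_eq_map, upper_eq_map, List.map_append,
    show List.map PySem.Chars.upperChar ['0'] = ['0'] from by decide]
  simp only [isIn_singleton, List.contains_append,
    show ((['0'] : List Char).contains 'B') = false from by decide,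
    show ((['0'] : List Char).contains 'D') = false from by decide, Bool.or_false]
  rw [filtrar_eq_filter, filtrar_eq_filter, upper_eq_map, upper_eq_map, List.map_append,
    show List.map PySem.Chars.upperChar ['0'] = ['0'] from by decide, List.filter_append,
    show List.filter (fun c => PySem.Chars.isIn [c] ['C', 'A', 'F', 'E']) ['0'] = [] from by decide,
    List.append_nil]

lemma esCaf_51966 : esCafetero 51966 = true := by
  have hd5 : hexDigitsChars 51966 = ['c', 'a', 'f', 'e'] := by
    rw [hexDigitsChars.eq_def]; norm_num
    rw [hexDigitsChars.eq_def]; norm_num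
    rw [hexDigitsChars.eq_def]; norm_num
    rw [hexDigitsChars.eq_def]; norm_num
    rw [hexDigitsChars.eq_def]; norm_num
    decide
  have hpy : pyHexChars 51966 = ['0', 'x', 'c', 'a', 'f', 'e'] := by
    unfold pyHexChars
    rw [if_neg (by norm_num), if_neg (by norm_num),
      show Int.toNat 51966 = 51966 from rfl, hd5]
    rfl
  unfold esCafetero
  rw [hpy]
  decide

lemma esCaf_pow (j : Nat) : esCafetero (51966 * 16 ^ j) = true := by
  induction j with
  | zero => simpa using esCaf_51966
  | succ j ih =>
      have h : (51966 : Int) * 16 ^ (j + 1) = 16 * (51966 * 16 ^ j) := by ring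
      rw [h, esCaf_mul16 _ (by positivity)]; exact ih

lemma le_caf_target (x : Int) : x ≤ 51966 * 16 ^ x.toNat :=
  calc x ≤ (x.toNat : Int) := Int.self_le_toNat x
  _ ≤ 16 ^ x.toNat := by exact_mod_cast Nat.le_of_lt (Nat.lt_pow_self (by decide))
  _ ≤ 51966 * 16 ^ x.toNat :=
      le_mul_of_one_le_left (pow_nonneg (by norm_num) _) (by norm_num)

lemma add_toNat_sub (x M : Int) (h : x ≤ M) : x + ((M - x).toNat : Int) = M := by
  rw [Int.toNat_of_nonneg (sub_nonneg.mpr h), add_comm, sub_add_cancel]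

lemma esCaf_exists (N : Int) : ∃ k : Nat, esCafetero (N + 1 + k) = true :=
  ⟨(51966 * 16 ^ (N + 1).toNat - (N + 1)).toNat, by
    rw [add_toNat_sub _ _ (le_caf_target (N + 1))]; exact esCaf_pow (N + 1).toNat⟩

def cafGap (N : Int) : Nat := Nat.find (esCaf_exists N)

lemma searchGap_decr (numero c : Int) (h : c < numero) :
    (numero - (c + 1)).toNat < (numero - c).toNat := by omega

lemma cafGap_decr (N : Int) (h : ¬ esCafetero (N + 1) = true) : cafGap (N + 1) < cafGap N := by
  have h0 := Nat.find_spec (esCaf_exists N)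
  have hne : cafGap N ≠ 0 := by
    intro h'
    unfold cafGap at h'
    rw [h', Nat.cast_zero, add_zero] at h0
    exact h h0
  have hk1 : 1 ≤ Nat.find (esCaf_exists N) := Nat.one_le_iff_ne_zero.mpr hne
  have hstep : esCafetero (N + 1 + 1 + ((Nat.find (esCaf_exists N) - 1 : Nat) : Int)) = true := by
    rw [Nat.cast_sub hk1, Nat.cast_one, show N + 1 + 1 + ((Nat.find (esCaf_exists N) : Int) - 1) =
      N + 1 + (Nat.find (esCaf_exists N) : Int) from by ring]
    exact h0
  exact lt_of_le_of_lt (Nat.find_le hstep) (Nat.sub_lt (Nat.lt_of_lt_of_le Nat.zero_lt_one hk1) Nat.one_pos)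

-- the while-loop of n_esimo_cafetero
def cafeLoopA (numero N c : Int) : Int :=
  if hc : c < numero then
    if hcaf : esCafetero (N + 1) then cafeLoopA numero (N + 1) (c + 1)
    else cafeLoopA numero (N + 1) c
  else N
termination_by ((numero - c).toNat, cafGap N)
decreasing_by
  · exact Prod.Lex.left _ _ (searchGap_decr numero c hc)
  · exact Prod.Lex.right _ (cafGap_decr N hcaf)

def n_esimo_cafetero (numero : Int) : Int := cafeLoopA numero 51966 1

-- ===== PORT B =====
-- termination support for the digit loop, cited by fsmLoop's decreasing_by
lemma floordiv16_toNat_lt (n : Int) (h : n > 0) : (PySem.Int.floordiv n 16).toNat < n.toNat := by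
  rw [PySem.Int.floordiv_eq_ediv_of_pos (by norm_num)]; omega

lemma searchGap_decr' (numero count : Int) (h : ¬ count + 1 ≥ numero) :
    (numero - (count + 1)).toNat < (numero - count).toNat := by omega

-- es_cafetero_fsm's while-loop: hex digits of n, least significant first
def fsmLoop (n state : Int) : Bool :=
  if hn : n > 0 then
    let d := PySem.Int.mod n 16
    if d < 10 then fsmLoop (PySem.Int.floordiv n 16) state
    else if state = 0 ∧ d = 14 then fsmLoop (PySem.Int.floordiv n 16) 1
    else if state = 1 ∧ d = 15 then fsmLoop (PySem.Int.floordiv n 16) 2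
    else if state = 2 ∧ d = 10 then fsmLoop (PySem.Int.floordiv n 16) 3
    else if state = 3 ∧ d = 12 then fsmLoop (PySem.Int.floordiv n 16) 4
    else false
  else state = 4
termination_by n.toNat
decreasing_by all_goals exact floordiv16_toNat_lt n hn

-- termination support for B's 'while True' search, cited by cafeLoopB's decreasing_by
lemma fsm_mul16 (m : Int) (hm : 0 < m) (s : Int) : fsmLoop (16 * m) s = fsmLoop m s := by
  rw [fsmLoop.eq_def]
  rw [dif_pos (by positivity)]
  have hmod : PySem.Int.mod (16 * m) 16 = 0 := by
    rw [PySem.Int.mod_eq_emod_of_pos (by norm_num)]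
    exact Int.mul_emod_right 16 m
  have hdiv : PySem.Int.floordiv (16 * m) 16 = m := by
    rw [PySem.Int.floordiv_eq_ediv_of_pos (by norm_num)]
    exact Int.mul_ediv_cancel_left m (by norm_num)
  simp only [hmod, hdiv]
  norm_num

def rfsm : List Nat → Int → Bool
  | [], s => s = 4
  | d :: ds, s =>
    if d < 10 then rfsm ds s
    else if s = 0 ∧ d = 14 then rfsm ds 1
    else if s = 1 ∧ d = 15 then rfsm ds 2
    else if s = 2 ∧ d = 10 then rfsm ds 3
    else if s = 3 ∧ d = 12 then rfsm ds 4
    else false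

lemma fsm_eq_rfsm (n : Nat) : ∀ s : Int, fsmLoop (n : Int) s = rfsm (Nat.digits 16 n) s := by
  induction n using Nat.strong_induction_on with
  | _ n ih =>
    intro s
    rw [fsmLoop.eq_def]
    by_cases h : n = 0
    · subst h; simp [rfsm]
    · have hpos : 0 < n := Nat.pos_of_ne_zero h
      rw [dif_pos (by exact_mod_cast hpos)]
      rw [Nat.digits_def' (by norm_num) hpos]
      have hmod : PySem.Int.mod (n : Int) 16 = ((n % 16 : Nat) : Int) := by
        exact_mod_cast PySem.Int.mod_natCast n 16
      have hdiv : PySem.Int.floordiv (n : Int) 16 = ((n / 16 : Nat) : Int) := by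
        exact_mod_cast PySem.Int.floordiv_natCast n 16
      have ihd := ih (n / 16) (Nat.div_lt_self hpos (by norm_num))
      simp only [hmod, hdiv, rfsm, ihd]
      norm_cast

lemma fsm_51966 : fsmLoop 51966 0 = true := by
  rw [show (51966 : Int) = ((51966 : Nat) : Int) from by norm_num, fsm_eq_rfsm]
  decide

lemma fsm_pow (j : Nat) : fsmLoop (51966 * 16 ^ j) 0 = true := by
  induction j with
  | zero => simpa using fsm_51966
  | succ j ih =>
      have h : (51966 : Int) * 16 ^ (j + 1) = 16 * (51966 * 16 ^ j) := by ring
      rw [h, fsm_mul16 _ (by positivity)]; exact ih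

lemma fsm_exists (m : Int) : ∃ k : Nat, fsmLoop (m + k) 0 = true :=
  ⟨(51966 * 16 ^ m.toNat - m).toNat, by
    rw [add_toNat_sub _ _ (le_caf_target m)]; exact fsm_pow m.toNat⟩

def fsmGap (m : Int) : Nat := Nat.find (fsm_exists m)

lemma fsmGap_decr (m : Int) (h : ¬ fsmLoop m 0 = true) : fsmGap (m + 1) < fsmGap m := by
  have h0 := Nat.find_spec (fsm_exists m)
  have hne : fsmGap m ≠ 0 := by
    intro h'
    unfold fsmGap at h'
    rw [h', Nat.cast_zero, add_zero] at h0
    exact h h0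
  have hk1 : 1 ≤ Nat.find (fsm_exists m) := Nat.one_le_iff_ne_zero.mpr hne
  have hstep : fsmLoop (m + 1 + ((Nat.find (fsm_exists m) - 1 : Nat) : Int)) 0 = true := by
    rw [Nat.cast_sub hk1, Nat.cast_one, show m + 1 + ((Nat.find (fsm_exists m) : Int) - 1) =
      m + (Nat.find (fsm_exists m) : Int) from by ring]
    exact h0
  exact lt_of_le_of_lt (Nat.find_le hstep) (Nat.sub_lt (Nat.lt_of_lt_of_le Nat.zero_lt_one hk1) Nat.one_pos)

-- the 'while True' loop of B
def cafeLoopB (numero m count : Int) : Int :=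
  if hcaf : fsmLoop m 0 then
    if hstop : count + 1 ≥ numero then m
    else cafeLoopB numero (m + 1) (count + 1)
  else cafeLoopB numero (m + 1) count
termination_by ((numero - count).toNat, fsmGap m)
decreasing_by
  · exact Prod.Lex.left _ _ (searchGap_decr' numero count hstop)
  · exact Prod.Lex.right _ (fsmGap_decr m hcaf)

def n_esimo_cafetero_alt (numero : Int) : Int := cafeLoopB numero 51966 0

-- ===== PRECONDITION & SPEC =====
def Spec_n_esimo_cafetero (numero : Int) (out : Int) : Prop := out = n_esimo_cafetero_alt numero
instance (numero : Int) (out : Int) : Decidable (Spec_n_esimo_cafetero numero out) := by unfold Spec_n_esimo_cafetero; infer_instance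

-- ===== CLAIM (what is proved, stated in full; the proofs are below) =====
def Claim_equal_n_esimo_cafetero : Prop := ∀ (numero : Int), Dom_n_esimo_cafetero numero → Spec_n_esimo_cafetero numero (n_esimo_cafetero numero)

-- ===== LEMMAS AND PROOFS =====
def patS (s : Int) : List Nat :=
  if s = 0 then [14, 15, 10, 12] else if s = 1 then [15, 10, 12]
  else if s = 2 then [10, 12] else if s = 3 then [12] else []

lemma rfsm_spec (l : List Nat) (s : Int)
    (hs : s = 0 ∨ s = 1 ∨ s = 2 ∨ s = 3 ∨ s = 4) :
    rfsm l s = true ↔ l.filter (fun d => 10 ≤ d) = patS s := by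
  induction l generalizing s with
  | nil =>
    rcases hs with rfl | rfl | rfl | rfl | rfl <;> simp [rfsm, patS]
  | cons d ds ih =>
    by_cases h1 : d < 10
    · have hf : (10 ≤ d) = False := by simp; omega
      simp only [rfsm, List.filter_cons, if_pos h1, hf, decide_false, cond_false]
      exact ih s hs
    · have hf : (10 ≤ d) = True := by simp; omega
      rcases hs with rfl | rfl | rfl | rfl | rfl
      · by_cases hd : d = 14 <;>
          simp [rfsm, List.filter_cons, hf, h1, hd, patS, ih 1 (by norm_num)]
      · by_cases hd : d = 15 <;>
          simp [rfsm, List.filter_cons, hf, h1, hd, patS, ih 2 (by norm_num)]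
      · by_cases hd : d = 10 <;>
          simp [rfsm, List.filter_cons, hf, h1, hd, patS, ih 3 (by norm_num)]
      · by_cases hd : d = 12 <;>
          simp [rfsm, List.filter_cons, hf, h1, hd, patS, ih 4 (by norm_num)]
      · simp [rfsm, List.filter_cons, hf, h1, patS]

def letterB (d : Nat) : Bool := d == 10 || d == 12 || d == 14 || d == 15

lemma filter_letter_eq (l : List Nat) (hl : ∀ d ∈ l, d < 16) :
    ∀ P : List Nat, 11 ∉ P → 13 ∉ P →
    (l.filter (fun d => 10 ≤ d) = P ↔ (11 ∉ l ∧ 13 ∉ l ∧ l.filter letterB = P)) := by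
  induction l with
  | nil => intro P _ _; simp
  | cons d ds ih =>
    intro P hP11 hP13
    have hd := hl d (List.mem_cons_self)
    have hds : ∀ x ∈ ds, x < 16 := fun x hx => hl x (List.mem_cons_of_mem _ hx)
    have hih := ih hds P hP11 hP13
    by_cases h1 : d < 10
    · have hf : (10 ≤ d) = False := by simp; omega
      have hlet : letterB d = false := by
        have h10 : (d == 10) = false := by simp; omega
        have h12 : (d == 12) = false := by simp; omega
        have h14 : (d == 14) = false := by simp; omega
        have h15 : (d == 15) = false := by simp; omega
        simp [letterB, h10, h12, h14, h15]
      have h11 : (11 : Nat) ≠ d := by omega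
      have h13 : (13 : Nat) ≠ d := by omega
      simp [List.filter_cons, hf, hlet, List.mem_cons]
      tauto
    · have hf : (10 ≤ d) = True := by simp; omega
      rcases P with _ | ⟨q, P'⟩
      · interval_cases d <;>
          simp [List.filter_cons, hf, letterB]
      · simp only [List.mem_cons, not_or] at hP11 hP13
        have hih' := ih hds P' hP11.2 hP13.2
        interval_cases d <;>
          simp [List.filter_cons, hf, letterB, List.mem_cons, not_or] <;>
          tauto

lemma hexDigitsChars_eq (n : Nat) : hexDigitsChars n = ((Nat.digits 16 n).map Nat.digitChar).reverse := by
  induction n using Nat.strong_induction_on with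
  | _ n ih =>
    rw [hexDigitsChars.eq_def]
    by_cases h : n = 0
    · simp [h]
    · rw [dif_neg h, Nat.digits_def' (by norm_num) (Nat.pos_of_ne_zero h),
        ih (n / 16) (Nat.div_lt_self (Nat.pos_of_ne_zero h) (by norm_num))]
      simp

def ucD (d : Nat) : Char := PySem.Chars.upperChar (Nat.digitChar d)

lemma ucD_facts : ∀ d : Nat, d < 16 →
    (PySem.Chars.upperChar (ucD d) = ucD d ∧
     ((ucD d = 'B') ↔ d = 11) ∧ ((ucD d = 'D') ↔ d = 13) ∧
     (PySem.Chars.isIn [ucD d] ['C','A','F','E'] = letterB d)) := by decide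

lemma ucD_eqs : ∀ d : Nat, d < 16 →
    (((ucD d = 'C') ↔ d = 12) ∧ ((ucD d = 'A') ↔ d = 10) ∧
     ((ucD d = 'F') ↔ d = 15) ∧ ((ucD d = 'E') ↔ d = 14)) := by decide

lemma map_ucD_inj (xs : List Nat) (h : ∀ d ∈ xs, d < 16)
    (he : xs.map ucD = ['E','F','A','C']) : xs = [14, 15, 10, 12] := by
  have hl : xs.length = 4 := by have := congrArg List.length he; simpa using this
  rcases xs with _ | ⟨a, _ | ⟨b, _ | ⟨c, _ | ⟨d, _ | ⟨e, tl⟩⟩⟩⟩⟩ <;> simp at hl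
  simp only [List.map_cons, List.map_nil, List.cons.injEq, and_true] at he
  obtain ⟨h1, h2, h3, h4⟩ := he
  have ha := ((ucD_eqs a (h a (by simp))).2.2.2).mp h1
  have hb := ((ucD_eqs b (h b (by simp))).2.2.1).mp h2
  have hc := ((ucD_eqs c (h c (by simp))).2.1).mp h3
  have hd := ((ucD_eqs d (h d (by simp))).1).mp h4
  simp [ha, hb, hc, hd]



lemma esCaf_char (n : Nat) (hn : 0 < n) :
    esCafetero (n : Int) = true ↔
      (11 ∉ Nat.digits 16 n ∧ 13 ∉ Nat.digits 16 n ∧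
        (Nat.digits 16 n).filter letterB = [14, 15, 10, 12]) := by
  have hlt : ∀ d ∈ Nat.digits 16 n, d < 16 := fun d hd => Nat.digits_lt_base (by norm_num) hd
  have hpy : pyHexChars (n : Int) = ['0', 'x'] ++ hexDigitsChars n := by
    unfold pyHexChars
    rw [if_neg (by omega), if_neg (by exact_mod_cast hn.ne'), Int.toNat_natCast]
  set L := Nat.digits 16 n with hL
  have hnhex : PySem.Chars.upper (pyHexChars (n : Int)) = '0' :: 'X' :: (L.map ucD).reverse := by
    rw [hpy, upper_eq_map, hexDigitsChars_eq, ← hL]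
    simp [List.map_reverse, List.map_map]
    exact ⟨by decide, by decide, fun a _ => rfl⟩
  have hB : (('0' :: 'X' :: (L.map ucD).reverse).contains 'B') = true ↔ 11 ∈ L := by
    simp only [List.contains_iff_mem, List.mem_cons, List.mem_reverse, List.mem_map]
    constructor
    · rintro (h | h | ⟨d, hd, hucd⟩)
      · exact absurd h (by decide)
      · exact absurd h (by decide)
      · have := ((ucD_facts d (hlt d hd)).2.1).mp hucd; subst this; exact hd
    · intro h11; exact Or.inr (Or.inr ⟨11, h11, by decide⟩)
  have hD : (('0' :: 'X' :: (L.map ucD).reverse).contains 'D') = true ↔ 13 ∈ L := by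
    simp only [List.contains_iff_mem, List.mem_cons, List.mem_reverse, List.mem_map]
    constructor
    · rintro (h | h | ⟨d, hd, hucd⟩)
      · exact absurd h (by decide)
      · exact absurd h (by decide)
      · have := ((ucD_facts d (hlt d hd)).2.2.1).mp hucd; subst this; exact hd
    · intro h13; exact Or.inr (Or.inr ⟨13, h13, by decide⟩)
  have hfiltrar : filtrarCAFE ('0' :: 'X' :: (L.map ucD).reverse) =
      ((L.filter letterB).map ucD).reverse := by
    rw [filtrar_eq_filter, upper_eq_map]
    have hfix : ('0' :: 'X' :: (L.map ucD).reverse).map PySem.Chars.upperChar =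
        '0' :: 'X' :: (L.map ucD).reverse := by
      refine (List.map_congr_left ?_).trans (List.map_id _)
      intro c hc
      simp only [List.mem_cons, List.mem_reverse, List.mem_map] at hc
      rcases hc with rfl | rfl | ⟨d, hd, rfl⟩
      · rfl
      · rfl
      · exact (ucD_facts d (hlt d hd)).1
    rw [hfix]
    simp only [List.filter_cons]
    rw [show (PySem.Chars.isIn ['0'] ['C','A','F','E']) = false from by decide,
        show (PySem.Chars.isIn ['X'] ['C','A','F','E']) = false from by decide]
    simp only [Bool.false_eq_true, if_false]
    rw [List.filter_reverse, List.filter_map]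
    congr 1
    exact congrArg (List.map ucD) (List.filter_congr (fun d hd => by
      simpa using (ucD_facts d (hlt d hd)).2.2.2))
  simp only [esCafetero, hnhex, hfiltrar, isIn_singleton]
  split_ifs with h1 h2
  · simp only [Bool.false_eq_true, false_iff]
    rintro ⟨h11, h13, hf⟩
    rcases Bool.or_eq_true_iff.mp h1 with h | h
    · exact h11 (hB.mp h)
    · exact h13 (hD.mp h)
  · simp only [true_iff]
    refine ⟨?_, ?_, ?_⟩
    · intro h11; exact h1 (by rw [Bool.or_eq_true_iff]; exact Or.inl (hB.mpr h11))
    · intro h13; exact h1 (by rw [Bool.or_eq_true_iff]; exact Or.inr (hD.mpr h13))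
    · refine map_ucD_inj (L.filter letterB)
        (fun d hd => hlt d (List.mem_of_mem_filter hd)) ?_
      have := congrArg List.reverse h2
      simpa using this
  · simp only [Bool.false_eq_true, false_iff]
    rintro ⟨h11, h13, hf⟩
    apply h2
    rw [hf]
    decide

theorem caf_eq_fsm (n : Int) (hn : 0 < n) : esCafetero n = fsmLoop n 0 := by
  obtain ⟨m, rfl⟩ : ∃ m : Nat, n = (m : Int) := ⟨n.toNat, by omega⟩
  have hm : 0 < m := by exact_mod_cast hn
  have hlt : ∀ d ∈ Nat.digits 16 m, d < 16 := fun d hd => Nat.digits_lt_base (by norm_num) hd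
  rw [← Bool.coe_iff_coe, esCaf_char m hm, fsm_eq_rfsm m 0,
    rfsm_spec _ 0 (by norm_num),
    filter_letter_eq _ hlt (patS 0) (by decide) (by decide),
    show patS 0 = [14, 15, 10, 12] from rfl]

theorem loop_eq (numero N c : Int) (hN : 0 ≤ N) (hc : c < numero) :
    cafeLoopA numero N c = cafeLoopB numero (N + 1) c := by
  revert hN hc
  induction N, c using cafeLoopA.induct (numero := numero) with
  | case1 N c hc' hcaf ih =>
    intro hN hc
    rw [cafeLoopA.eq_def, dif_pos hc', dif_pos hcaf,
      cafeLoopB.eq_def, dif_pos (by rw [← caf_eq_fsm (N + 1) (by omega)]; exact hcaf)]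
    by_cases hstop : c + 1 ≥ numero
    · rw [dif_pos hstop, cafeLoopA.eq_def, dif_neg (by omega)]
    · rw [dif_neg hstop]
      exact ih (by omega) (by omega)
  | case2 N c hc' hcaf ih =>
    intro hN hc
    rw [cafeLoopA.eq_def, dif_pos hc', dif_neg hcaf,
      cafeLoopB.eq_def, dif_neg (by rw [← caf_eq_fsm (N + 1) (by omega)]; exact hcaf)]
    exact ih (by omega) hc'
  | case3 N c hc' =>
    intro hN hc
    exact absurd hc hc'

-- ===== VERDICT (by name: the statement is the Claim_ definition above) =====
theorem n_esimo_cafetero_spec : Claim_equal_n_esimo_cafetero := by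
  intro numero _
  unfold Spec_n_esimo_cafetero n_esimo_cafetero n_esimo_cafetero_alt
  by_cases h : (1 : Int) < numero
  · rw [loop_eq numero 51966 1 (by norm_num) h,
      cafeLoopB.eq_def (m := 51966), dif_pos fsm_51966, dif_neg (by omega)]
    norm_num
  · rw [cafeLoopA.eq_def, dif_neg (by omega),
      cafeLoopB.eq_def, dif_pos fsm_51966, dif_pos (by omega)]
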